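-- pv_equiv track=rewrite | github.com/Yashwant-Tailor/LeetCodeSolution | python_solutions/1703.py | get_right_moves
-- ===== SOURCE A (Python) =====
-- def get_right_moves(nums,left_idx,right_idx):
--     moves = 0
--     curr_one = 0
--     zero_cnt = 0
--     for idx in range(right_idx,left_idx,-1):
--         if nums[idx] == 1:
--             curr_one += 1
--         else:
--             moves += curr_one
--             zero_cnt += 1
--     return zero_cnt,moves
-- ===== SOURCE B (Python) =====
-- def get_right_moves(nums, left_idx, right_idx):
--     idxs = range(left_idx + 1, right_idx + 1)
--     ones = [i for i in idxs if nums[i] == 1]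
--     zero_cnt = len(idxs) - len(ones)
--     moves = sum(p - (left_idx + 1) - k for k, p in enumerate(ones))
--     return zero_cnt, moves
-- ===== Notes on version B (the rewrite author's own statement) =====
-- stated objective: alternative
-- what changed: Instead of a backward scan with running one/zero counters, B first collects the positions of the ones in the window, then computes moves by closed-form index arithmetic (the k-th one at position p has p-(left_idx+1)-k zeros before it) and zero_cnt as window length minus number of ones.
import Mathlib
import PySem

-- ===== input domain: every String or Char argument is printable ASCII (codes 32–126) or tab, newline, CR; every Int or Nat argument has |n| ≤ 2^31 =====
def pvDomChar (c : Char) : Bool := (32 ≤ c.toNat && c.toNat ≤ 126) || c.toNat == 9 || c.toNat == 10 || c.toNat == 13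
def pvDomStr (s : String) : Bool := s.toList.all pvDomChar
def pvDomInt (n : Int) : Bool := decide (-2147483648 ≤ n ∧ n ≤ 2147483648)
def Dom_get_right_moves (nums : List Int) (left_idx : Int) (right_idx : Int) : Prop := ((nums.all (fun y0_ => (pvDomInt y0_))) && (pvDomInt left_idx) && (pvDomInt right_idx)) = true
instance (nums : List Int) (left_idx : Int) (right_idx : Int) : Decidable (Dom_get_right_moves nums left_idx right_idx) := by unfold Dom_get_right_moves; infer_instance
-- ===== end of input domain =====

-- B replaces A's backward counter scan by a staged computation: collect the positions of the
-- ones in the window, then get moves by closed-form index arithmetic over enumerate and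
-- zero_cnt as window length minus ones count; same linear cost ("alternative").

-- ===== PORT A =====
-- state (moves, curr_one, zero_cnt); returns (zero_cnt, moves)
def get_right_moves (nums : List Int) (left_idx : Int) (right_idx : Int) : Int × Int :=
  let s := (PySem.List.pyRange right_idx left_idx (-1)).foldl
    (fun (s : Int × Int × Int) idx =>
      if PySem.List.pyGetD nums idx 0 = 1 then (s.1, s.2.1 + 1, s.2.2)
      else (s.1 + s.2.1, s.2.1, s.2.2 + 1))
    (0, 0, 0)
  (s.2.2, s.1)

-- ===== PORT B =====
def get_right_moves_alt (nums : List Int) (left_idx : Int) (right_idx : Int) : Int × Int :=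
  let idxs := PySem.List.pyRange (left_idx + 1) (right_idx + 1) 1
  let ones := idxs.filter (fun i => decide (PySem.List.pyGetD nums i 0 = 1))
  let zero_cnt : Int := (idxs.length : Int) - (ones.length : Int)
  let moves : Int := (PySem.List.enumerate ones 0).foldl
    (fun (acc : Int) kp => acc + (kp.2 - (left_idx + 1) - kp.1)) 0
  (zero_cnt, moves)

-- ===== PRECONDITION & SPEC =====
-- Pre_ excludes exactly the inputs on which Python A (and B alike) raises IndexError: a
-- nonempty window whose indices are not all valid (negative wraparound included) for nums.
def Pre_get_right_moves (nums : List Int) (left_idx : Int) (right_idx : Int) : Prop :=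
  right_idx ≤ left_idx ∨ (-(nums.length : Int) ≤ left_idx + 1 ∧ right_idx < (nums.length : Int))
instance (nums : List Int) (left_idx : Int) (right_idx : Int) : Decidable (Pre_get_right_moves nums left_idx right_idx) := by unfold Pre_get_right_moves; infer_instance

def pvWitness_get_right_moves : List Int × Int × Int := ([1, 0, 1], 0, 2)

def Spec_get_right_moves (nums : List Int) (left_idx : Int) (right_idx : Int) (out : Int × Int) : Prop := out = get_right_moves_alt nums left_idx right_idx
instance (nums : List Int) (left_idx : Int) (right_idx : Int) (out : Int × Int) : Decidable (Spec_get_right_moves nums left_idx right_idx out) := by unfold Spec_get_right_moves; infer_instance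

-- ===== CLAIM (what is proved, stated in full; the proofs are below) =====
def Claim_equal_get_right_moves : Prop := ∀ (nums : List Int) (left_idx : Int) (right_idx : Int), Dom_get_right_moves nums left_idx right_idx → Pre_get_right_moves nums left_idx right_idx → Spec_get_right_moves nums left_idx right_idx (get_right_moves nums left_idx right_idx)

-- ===== LEMMAS AND PROOFS =====

-- counts over the list of window values
def pvOnes : List Int → Int
  | [] => 0
  | x :: t => (if x = 1 then 1 else 0) + pvOnes t

def pvZeros : List Int → Int
  | [] => 0
  | x :: t => (if x = 1 then 0 else 1) + pvZeros t

-- per-zero: ones to its right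
def pvCross : List Int → Int
  | [] => 0
  | x :: t => (if x = 1 then 0 else pvOnes t) + pvCross t

-- per-one: zeros to its left (z = zeros already seen)
def pvCross2 (z : Int) : List Int → Int
  | [] => 0
  | x :: t => if x = 1 then z + pvCross2 z t else pvCross2 (z + 1) t

theorem pvCross2_eq (l : List Int) : ∀ z, pvCross2 z l = z * pvOnes l + pvCross l := by
  induction l with
  | nil => intro z; simp [pvCross2, pvOnes, pvCross]
  | cons x t ih =>
    intro z
    by_cases hx : x = 1 <;> simp only [pvCross2, pvOnes, pvCross, hx, if_true, ite_false,
      if_neg, if_pos, ih] <;> ring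

theorem pvOnes_add_pvZeros (l : List Int) : pvOnes l + pvZeros l = (l.length : Int) := by
  induction l with
  | nil => simp [pvOnes, pvZeros]
  | cons x t ih =>
    by_cases hx : x = 1 <;> simp [pvOnes, pvZeros, hx] <;> omega

theorem foldA_eq (l : List Int) : ∀ (m c z : Int),
    l.reverse.foldl (fun (s : Int × Int × Int) v =>
        if v = 1 then (s.1, s.2.1 + 1, s.2.2) else (s.1 + s.2.1, s.2.1, s.2.2 + 1)) (m, c, z)
      = (m + c * pvZeros l + pvCross l, c + pvOnes l, z + pvZeros l) := by
  induction l with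
  | nil => intro m c z; simp [pvZeros, pvOnes, pvCross]
  | cons x t ih =>
    intro m c z
    rw [List.reverse_cons, List.foldl_append, ih]
    by_cases hx : x = 1 <;>
      simp only [List.foldl_cons, List.foldl_nil, hx, if_true, ite_true, ite_false, if_neg,
        pvZeros, pvOnes, pvCross, Prod.mk.injEq] <;>
      refine ⟨by ring, by ring, by ring⟩

-- filtered-length = pvOnes of the mapped values
theorem filter_length_eq_pvOnes (nums : List Int) (idxs : List Int) :
    (((idxs.filter (fun i => decide (PySem.List.pyGetD nums i 0 = 1))).length : Int))
      = pvOnes (idxs.map (fun i => PySem.List.pyGetD nums i 0)) := by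
  induction idxs with
  | nil => simp [pvOnes]
  | cons i t ih =>
    by_cases h : PySem.List.pyGetD nums i 0 = 1 <;>
      simp [List.filter_cons, h, pvOnes, ih] <;> omega

-- the staged enumerate-sum equals pvCross2 over the mapped window values
theorem enumSum_eq (nums : List Int) : ∀ (n : Nat) (a a0 k m : Int),
    (PySem.List.enumerate
        ((PySem.List.pyRange a (a + n) 1).filter (fun i => decide (PySem.List.pyGetD nums i 0 = 1))) k).foldl
      (fun (acc : Int) kp => acc + (kp.2 - a0 - kp.1)) m
    = m + pvCross2 (a - a0 - k) ((PySem.List.pyRange a (a + n) 1).map (fun i => PySem.List.pyGetD nums i 0)) := by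
  intro n
  induction n with
  | zero =>
    intro a a0 k m
    simp [PySem.List.pyRange_one_eq_nil (le_refl a), PySem.List.enumerate_nil, pvCross2]
  | succ n ih =>
    intro a a0 k m
    have hlt : a < a + ((n : Int) + 1) := by omega
    rw [show ((n + 1 : Nat) : Int) = (n : Int) + 1 by push_cast; ring] at *
    rw [PySem.List.pyRange_one_cons hlt]
    have he : a + ((n : Int) + 1) = (a + 1) + (n : Int) := by ring
    by_cases h : PySem.List.pyGetD nums a 0 = 1
    · simp only [List.filter_cons, h, decide_true, if_pos, List.map_cons,
        PySem.List.enumerate_cons, List.foldl_cons]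
      rw [he, ih (a + 1) a0 (k + 1) (m + (a - a0 - k))]
      simp only [pvCross2, h, if_pos]
      ring_nf
    · simp only [List.filter_cons, h, decide_false, Bool.false_eq_true, if_false, List.map_cons]
      rw [he, ih (a + 1) a0 k m]
      simp only [pvCross2, if_neg h]
      rw [show a - a0 - k + 1 = a + 1 - a0 - k by ring]

-- normalize an arbitrary forward range to the a + n form
theorem pvRangeNorm (a b : Int) :
    PySem.List.pyRange a b 1 = PySem.List.pyRange a (a + ((b - a).toNat : Int)) 1 := by
  rw [PySem.List.pyRange_one, PySem.List.pyRange_one]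
  congr 2
  omega

-- ===== VERDICT (by name: the statement is the Claim_ definition above) =====
theorem get_right_moves_spec : Claim_equal_get_right_moves := by
  intro nums left_idx right_idx _ _
  unfold Spec_get_right_moves get_right_moves get_right_moves_alt
  rw [PySem.List.pyRange_neg_one_eq_reverse,
      ← List.foldl_map (f := fun i => PySem.List.pyGetD nums i 0)
        (g := fun (s : Int × Int × Int) v =>
          if v = 1 then (s.1, s.2.1 + 1, s.2.2) else (s.1 + s.2.1, s.2.1, s.2.2 + 1)),
      List.map_reverse (f := fun i => PySem.List.pyGetD nums i 0), foldA_eq]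
  simp only []
  rw [pvRangeNorm (left_idx + 1) (right_idx + 1), enumSum_eq nums _ (left_idx + 1) (left_idx + 1) 0 0,
      filter_length_eq_pvOnes]
  have hlen : ((PySem.List.pyRange (left_idx + 1) (left_idx + 1 + (((right_idx + 1) - (left_idx + 1)).toNat : Int)) 1).length : Int)
      = (((PySem.List.pyRange (left_idx + 1) (left_idx + 1 + (((right_idx + 1) - (left_idx + 1)).toNat : Int)) 1).map (fun i => PySem.List.pyGetD nums i 0)).length : Int) := by
    simp
  set l := (PySem.List.pyRange (left_idx + 1) (left_idx + 1 + (((right_idx + 1) - (left_idx + 1)).toNat : Int)) 1).map (fun i => PySem.List.pyGetD nums i 0) with hl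
  have h2 := pvOnes_add_pvZeros l
  simp only [pvCross2_eq, Prod.mk.injEq]
  constructor
  · omega
  · ring_nf
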